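-- pv_equiv track=rewrite | github.com/SaewonY/algorithm_study | programmers/problem_34.py | solution
-- ===== SOURCE A (Python) =====
-- import itertools
--
-- def baseball_fun(x, y):
--
--     x = list(x)
--     y = list(y)
--     s, b = 0, 0
--
--     for i in range(3):
--         if x[i] in y:
--             if y.index(x[i]) == i:
--                 s += 1
--             else:
--                 b += 1
--     return [s, b]
--
-- def solution(baseball):
--
--     '''
--     referece: https://leedakyeong.tistory.com/entry/%ED%94%84%EB%A1%9C%EA%B7%B8%EB%9E%98%EB%A8%B8%EC%8A%A4-%EC%88%AB%EC%9E%90-%EC%95%BC%EA%B5%AC-in-python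
--     '''
--     v = list(map(lambda x: str(x[0]), baseball)) # 질문하는 숫자
--     r = list(map(lambda x: [x[1], x[2]], baseball)) # 질문에 대한 답
--
--     all = list(itertools.permutations(range(1, 10), 3)) # 모든 가능한 수
--     all = list(map(lambda x: list(map(str, x)), all))
--
--     cnt = 0
--     for x in all:
--         if [baseball_fun(x, y) for y in v] == r:
--             cnt += 1
--
--     return cnt
-- ===== SOURCE B (Python) =====
-- def solution(baseball):
--     # Precompute once per query: first-occurrence index of each digit character
--     # of str(query), plus the expected strike/ball counts.
--     prepared = []
--     for row in baseball:
--         pos = {}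
--         for j, ch in enumerate(str(row[0])):
--             pos.setdefault(ch, j)
--         prepared.append((pos, row[1], row[2]))
--
--     # Depth-first search building the candidate number digit by digit, scoring
--     # all queries incrementally (one dict lookup per query per chosen digit),
--     # so shared prefixes of candidates are scored only once.
--     def dfs(i, used, scores):
--         if i >= 3:
--             return 1 if all(s == p[1] and b == p[2]
--                             for (s, b), p in zip(scores, prepared)) else 0
--         total = 0
--         for d in "123456789":
--             if d not in used:
--                 total += dfs(i + 1, used + [d],
--                              [(s + (1 if p[0].get(d) == i else 0),
--                                b + (1 if d in p[0] and p[0][d] != i else 0))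
--                               for (s, b), p in zip(scores, prepared)])
--         return total
--
--     return dfs(0, [], [(0, 0)] * len(baseball))
-- ===== Notes on version B (the rewrite author's own statement) =====
-- stated objective: faster
-- what changed: B abandons A's enumerate-504-permutations-and-rescore-with-baseball_fun loop: it precomputes per query a dict of first-occurrence positions of the digits of str(query) (so list(y) and the repeated y.index scans disappear), then counts candidates by a digit-by-digit DFS over the three positions that updates every query's (strike, ball) score incrementally with one dict lookup per query, sharing the scoring work of common digit prefixes.
import Mathlib
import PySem

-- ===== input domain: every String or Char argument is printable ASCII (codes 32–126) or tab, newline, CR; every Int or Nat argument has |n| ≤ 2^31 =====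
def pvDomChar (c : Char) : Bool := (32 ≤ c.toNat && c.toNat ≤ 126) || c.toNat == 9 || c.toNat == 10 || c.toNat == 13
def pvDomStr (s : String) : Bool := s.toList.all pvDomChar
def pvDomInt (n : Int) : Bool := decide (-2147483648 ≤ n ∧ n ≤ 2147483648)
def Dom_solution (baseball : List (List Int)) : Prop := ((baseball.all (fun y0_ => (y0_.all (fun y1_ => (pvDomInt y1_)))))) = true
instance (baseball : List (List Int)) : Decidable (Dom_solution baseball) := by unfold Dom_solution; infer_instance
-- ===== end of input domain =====

-- B replaces A's "score all 504 permutations against every query with baseball_fun" by a digit-by-digit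
-- DFS that scores every query incrementally via a per-query first-occurrence dict built once
-- (objective: faster — the inner list(y)/y.index scans disappear and shared prefixes are scored once).

-- Python's 1-character string for a character (used by both ports: list(y) / iterating a str).
def pvOfChar (c : Char) : String := String.ofList [c]

-- ===== PORT A =====
-- baseball_fun(x, y): x a list of 1-char digit strings (length 3 at every call), y the query string;
-- list(y) = its characters as 1-char strings. x[i] is always in range, so pyGetD's default is never
-- used; inside the branch x[i] ∈ y, index? is some, so its getD default is never used either.
def baseballFun (x : List String) (y : String) : List Int :=
  let yl : List String := y.toList.map pvOfChar
  let sb : Int × Int := (PySem.List.pyRange 0 3 1).foldl (fun (sb : Int × Int) i =>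
    let xi := PySem.List.pyGetD x i ""
    if xi ∈ yl then
      if ((PySem.List.index? yl xi).getD 0 : Int) = i then (sb.1 + 1, sb.2)
      else (sb.1, sb.2 + 1)
    else sb) (0, 0)
  [sb.1, sb.2]

-- itertools.permutations(range(1, 10), 3) is PySem.List.permutations (pyRange 1 10 1)
def solution (baseball : List (List Int)) : Int :=
  let v : List String := baseball.map (fun row => PySem.Int.toStr (PySem.List.pyGetD row 0 0))
  let r : List (List Int) := baseball.map (fun row => [PySem.List.pyGetD row 1 0, PySem.List.pyGetD row 2 0])
  let all : List (List String) :=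
    (PySem.List.permutations (PySem.List.pyRange 1 10 1) 3).map (fun t => t.map PySem.Int.toStr)
  all.foldl (fun cnt x => if v.map (fun y => baseballFun x y) = r then cnt + 1 else cnt) 0

-- ===== PORT B =====
-- pos = {}; for j, ch in enumerate(str(row[0])): pos.setdefault(ch, j)
def buildPos (qs : String) : PySem.Dict String Int :=
  (PySem.List.enumerate qs.toList).foldl
    (fun pos jc => pos.setdefault (pvOfChar jc.2) jc.1) PySem.Dict.empty

-- one dict lookup per query: the score update for choosing digit d at position i
def dfsStep (prepared : List (PySem.Dict String Int × Int × Int)) (i : Int) (d : String)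
    (scores : List (Int × Int)) : List (Int × Int) :=
  (scores.zip prepared).map (fun sp =>
    (sp.1.1 + (if sp.2.1.get? d == some i then 1 else 0),
     sp.1.2 + (if (sp.2.1.get? d).isSome && !(sp.2.1.get? d == some i) then 1 else 0)))

def dfsB (prepared : List (PySem.Dict String Int × Int × Int)) :
    Nat → List String → List (Int × Int) → Int
  | i, used, scores =>
    if 3 ≤ i then
      if (scores.zip prepared).all (fun sp => sp.1.1 == sp.2.2.1 && sp.1.2 == sp.2.2.2) then 1 else 0
    else
      (("123456789" : String).toList.map pvOfChar).foldl (fun total d =>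
        if d ∉ used then
          total + dfsB prepared (i + 1) (used ++ [d]) (dfsStep prepared (i : Int) d scores)
        else total) 0
  termination_by i => 3 - i
  decreasing_by omega

def solution_alt (baseball : List (List Int)) : Int :=
  let prepared : List (PySem.Dict String Int × Int × Int) :=
    baseball.map (fun row =>
      (buildPos (PySem.Int.toStr (PySem.List.pyGetD row 0 0)),
       PySem.List.pyGetD row 1 0, PySem.List.pyGetD row 2 0))
  dfsB prepared 0 [] (List.replicate baseball.length ((0 : Int), (0 : Int)))

-- ===== PRECONDITION & SPEC =====
-- Python A indexes row[0], row[1], row[2] on every query row: a row shorter than 3 raises IndexError.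
def Pre_solution (baseball : List (List Int)) : Prop := ∀ row ∈ baseball, 3 ≤ row.length
instance (baseball : List (List Int)) : Decidable (Pre_solution baseball) := by unfold Pre_solution; infer_instance
def pvWitness_solution : List (List Int) := [[123, 1, 1], [356, 1, 0], [327, 2, 0], [489, 0, 1]]
def Spec_solution (baseball : List (List Int)) (out : Int) : Prop := out = solution_alt baseball
instance (baseball : List (List Int)) (out : Int) : Decidable (Spec_solution baseball out) := by unfold Spec_solution; infer_instance

-- ===== CLAIM (what is proved, stated in full; the proofs are below) =====
def Claim_equal_solution : Prop := ∀ (baseball : List (List Int)), Dom_solution baseball → Pre_solution baseball → Spec_solution baseball (solution baseball)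

-- ===== LEMMAS AND PROOFS =====

-- the candidate sequences dfsB enumerates below depth i with digits `used` excluded
def seqsB : Nat → List String → List (List String)
  | 0, _ => [[]]
  | n + 1, used => (("123456789" : String).toList.map pvOfChar).flatMap (fun d =>
      if d ∉ used then (seqsB n (used ++ [d])).map (fun t => d :: t) else [])

-- folding dfsStep over a whole candidate suffix
def applyB (prepared : List (PySem.Dict String Int × Int × Int)) :
    Int → List (Int × Int) → List String → List (Int × Int)
  | _, scores, [] => scores
  | i, scores, d :: rest => applyB prepared (i + 1) (dfsStep prepared i d scores) rest

def okB (prepared : List (PySem.Dict String Int × Int × Int)) (scores : List (Int × Int)) : Bool :=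
  (scores.zip prepared).all (fun sp => sp.1.1 == sp.2.2.1 && sp.1.2 == sp.2.2.2)

-- the dict of first occurrences IS Python's y.index on list(y)
theorem buildPos_get_aux (d : String) :
    ∀ (l : List Char) (s : Int) (acc : PySem.Dict String Int),
    ((PySem.List.enumerate l s).foldl (fun pos jc => pos.setdefault (pvOfChar jc.2) jc.1) acc).get? d
      = ((acc.get? d).or ((PySem.List.index? (l.map pvOfChar) d).map (fun n => s + (n : Int)))) := by
  intro l
  induction l with
  | nil => intro s acc; simp [PySem.List.enumerate_nil]
  | cons c l ih =>
    intro s acc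
    rw [PySem.List.enumerate_cons]
    simp only [List.foldl_cons, List.map_cons]
    by_cases h : pvOfChar c = d
    · subst h
      rw [PySem.List.index?_cons_self]
      cases hacc : acc.get? (pvOfChar c) with
      | some v =>
        have hc : acc.contains (pvOfChar c) = true := by
          rw [PySem.Dict.contains_eq_isSome_get?, hacc]; rfl
        rw [PySem.Dict.setdefault_of_contains acc s hc, ih, hacc]
        simp
      | none =>
        have hc : acc.contains (pvOfChar c) = false := by
          rw [PySem.Dict.contains_eq_isSome_get?, hacc]; rfl
        rw [PySem.Dict.setdefault_of_not_contains acc s hc, ih,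
          PySem.Dict.get?_insert_self]
        simp
    · rw [PySem.List.index?_cons_of_ne (l.map pvOfChar) h, ih]
      have hg : (acc.setdefault (pvOfChar c) s).get? d = acc.get? d := by
        by_cases hc : acc.contains (pvOfChar c)
        · rw [PySem.Dict.setdefault_of_contains acc s hc]
        · rw [PySem.Dict.setdefault_of_not_contains acc s (by simpa using hc),
            PySem.Dict.get?_insert_of_ne acc s (Ne.symm h)]
      rw [hg]
      congr 1
      cases hi : PySem.List.index? (l.map pvOfChar) d
      · simp
      · simp; omega

theorem buildPos_get (qs : String) (d : String) :
    (buildPos qs).get? d = (PySem.List.index? (qs.toList.map pvOfChar) d).map (fun n => (n : Int)) := by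
  rw [buildPos, buildPos_get_aux d qs.toList 0 PySem.Dict.empty]
  simp

-- dfsB counts the candidate suffixes whose accumulated scores hit the expected ones
theorem dfsB_spec (prepared : List (PySem.Dict String Int × Int × Int)) :
    ∀ (n i : Nat) (used : List String) (scores : List (Int × Int)), i + n = 3 →
      dfsB prepared i used scores
        = ((seqsB n used).countP (fun t => okB prepared (applyB prepared (i : Int) scores t)) : Int) := by
  intro n
  induction n with
  | zero =>
    intro i used scores hi
    rw [dfsB, if_pos (by omega)]
    simp [seqsB, applyB, okB, List.countP_cons]
  | succ n ih =>
    intro i used scores hi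
    rw [dfsB, if_neg (by omega)]
    have hfun : (fun (total : Int) (d : String) =>
        if d ∉ used then
          total + dfsB prepared (i + 1) (used ++ [d]) (dfsStep prepared (i : Int) d scores)
        else total)
      = (fun (total : Int) (d : String) => total +
          (if d ∉ used then dfsB prepared (i + 1) (used ++ [d]) (dfsStep prepared (i : Int) d scores)
           else 0)) := by
      funext t d; split <;> simp
    rw [hfun, PySem.List.foldl_add, zero_add]
    simp only [seqsB, List.countP_flatMap]
    have hmap : (List.map (fun d =>
          if d ∉ used then dfsB prepared (i + 1) (used ++ [d]) (dfsStep prepared (i : Int) d scores)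
          else 0) (("123456789" : String).toList.map pvOfChar))
        = (List.map (fun d => ((if d ∉ used then
            (seqsB n (used ++ [d])).countP
              (fun t => okB prepared (applyB prepared ((i : Int) + 1) (dfsStep prepared (i : Int) d scores) t))
            else 0 : Nat) : Int)) (("123456789" : String).toList.map pvOfChar)) := by
      apply List.map_congr_left
      intro d _
      by_cases hd : d ∉ used
      · rw [if_pos hd, if_pos hd, ih (i + 1) (used ++ [d]) _ (by omega)]
        push_cast
        rfl
      · rw [if_neg hd, if_neg hd]; rfl
    rw [hmap]
    conv_rhs => rw [Nat.cast_list_sum, List.map_map]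
    congr 1
    apply List.map_congr_left
    intro d _
    by_cases hd : d ∉ used
    · simp only [Function.comp, if_pos hd, List.countP_map]
      rfl
    · simp [Function.comp, hd]

-- the 504 sequences of dfsB are exactly A's permutation list
set_option maxRecDepth 100000 in
theorem seqsB_eq_perms :
    seqsB 3 []
      = (PySem.List.permutations (PySem.List.pyRange 1 10 1) 3).map (fun t => t.map PySem.Int.toStr) := by
  decide

set_option maxRecDepth 100000 in
theorem seqsB_len : ∀ x ∈ seqsB 3 [], x.length = 3 := by decide

-- A's per-position step equals B's dict-lookup contributions
theorem stepPoint (qs d : String) (i : Int) (sb : Int × Int) :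
    (if d ∈ qs.toList.map pvOfChar then
       if ((PySem.List.index? (qs.toList.map pvOfChar) d).getD 0 : Int) = i then (sb.1 + 1, sb.2)
       else (sb.1, sb.2 + 1)
     else sb)
    = (sb.1 + (if (buildPos qs).get? d == some i then 1 else 0),
       sb.2 + (if ((buildPos qs).get? d).isSome && !((buildPos qs).get? d == some i) then 1 else 0)) := by
  rw [buildPos_get qs d]
  cases hi : PySem.List.index? (qs.toList.map pvOfChar) d with
  | none =>
    have hm : d ∉ qs.toList.map pvOfChar := (PySem.List.index?_eq_none_iff _ _).mp hi
    simp [hm]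
  | some j =>
    have hm : d ∈ qs.toList.map pvOfChar := (PySem.List.index?_isSome_iff _ _).mp (by rw [hi]; rfl)
    rw [if_pos hm]
    by_cases hj : (j : Int) = i <;> simp [hj]

-- A's baseball_fun as the sum of B's three per-position contributions
theorem baseballFun_eq (qs d0 d1 d2 : String) :
    baseballFun [d0, d1, d2] qs =
      [0 + (if (buildPos qs).get? d0 == some 0 then 1 else 0)
         + (if (buildPos qs).get? d1 == some 1 then 1 else 0)
         + (if (buildPos qs).get? d2 == some 2 then 1 else 0),
       0 + (if ((buildPos qs).get? d0).isSome && !((buildPos qs).get? d0 == some 0) then 1 else 0)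
         + (if ((buildPos qs).get? d1).isSome && !((buildPos qs).get? d1 == some 1) then 1 else 0)
         + (if ((buildPos qs).get? d2).isSome && !((buildPos qs).get? d2 == some 2) then 1 else 0)] := by
  have hr : PySem.List.pyRange 0 3 1 = [0, 1, 2] := by decide
  unfold baseballFun
  dsimp only
  rw [hr]
  have hb : (fun (sb : Int × Int) (i : Int) =>
      if PySem.List.pyGetD [d0, d1, d2] i "" ∈ qs.toList.map pvOfChar then
        if ((PySem.List.index? (qs.toList.map pvOfChar) (PySem.List.pyGetD [d0, d1, d2] i "")).getD 0 : Int) = i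
        then (sb.1 + 1, sb.2) else (sb.1, sb.2 + 1)
      else sb)
    = (fun (sb : Int × Int) (i : Int) =>
      (sb.1 + (if (buildPos qs).get? (PySem.List.pyGetD [d0, d1, d2] i "") == some i then 1 else 0),
       sb.2 + (if ((buildPos qs).get? (PySem.List.pyGetD [d0, d1, d2] i "")).isSome
                  && !((buildPos qs).get? (PySem.List.pyGetD [d0, d1, d2] i "") == some i) then 1 else 0))) := by
    funext sb i
    exact stepPoint qs (PySem.List.pyGetD [d0, d1, d2] i "") i sb
  rw [hb]
  simp only [List.foldl_cons, List.foldl_nil]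
  rfl

-- dfsStep distributes over cons
theorem dfsStep_cons (q : PySem.Dict String Int × Int × Int)
    (p : List (PySem.Dict String Int × Int × Int)) (i : Int) (d : String)
    (u : Int × Int) (s : List (Int × Int)) :
    dfsStep (q :: p) i d (u :: s)
      = (u.1 + (if q.1.get? d == some i then 1 else 0),
         u.2 + (if (q.1.get? d).isSome && !(q.1.get? d == some i) then 1 else 0)) :: dfsStep p i d s := rfl

-- per-query-row head equality
theorem rowEq (qs d0 d1 d2 : String) (r1 r2 : Int) :
    decide (baseballFun [d0, d1, d2] qs = [r1, r2])
    = ((0 + (if (buildPos qs).get? d0 == some 0 then 1 else 0)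
          + (if (buildPos qs).get? d1 == some 1 then 1 else 0)
          + (if (buildPos qs).get? d2 == some 2 then 1 else 0) : Int) == r1
       && (0 + (if ((buildPos qs).get? d0).isSome && !((buildPos qs).get? d0 == some 0) then 1 else 0)
          + (if ((buildPos qs).get? d1).isSome && !((buildPos qs).get? d1 == some 1) then 1 else 0)
          + (if ((buildPos qs).get? d2).isSome && !((buildPos qs).get? d2 == some 2) then 1 else 0) : Int) == r2) := by
  rw [baseballFun_eq]
  simp [List.cons.injEq, Bool.beq_eq_decide_eq]

-- per-candidate equality of A's full-match test and B's accumulated-score test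
theorem cand_eq (baseball : List (List Int)) (d0 d1 d2 : String) :
    decide ((baseball.map (fun row => PySem.Int.toStr (PySem.List.pyGetD row 0 0))).map
        (fun y => baseballFun [d0, d1, d2] y)
      = baseball.map (fun row => [PySem.List.pyGetD row 1 0, PySem.List.pyGetD row 2 0]))
    = okB (baseball.map (fun row =>
        (buildPos (PySem.Int.toStr (PySem.List.pyGetD row 0 0)),
         PySem.List.pyGetD row 1 0, PySem.List.pyGetD row 2 0)))
        (applyB (baseball.map (fun row =>
          (buildPos (PySem.Int.toStr (PySem.List.pyGetD row 0 0)),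
           PySem.List.pyGetD row 1 0, PySem.List.pyGetD row 2 0))) 0
          ((baseball.map (fun row =>
            (buildPos (PySem.Int.toStr (PySem.List.pyGetD row 0 0)),
             PySem.List.pyGetD row 1 0, PySem.List.pyGetD row 2 0))).map (fun _ => ((0 : Int), (0 : Int))))
          [d0, d1, d2]) := by
  induction baseball with
  | nil => rfl
  | cons row rest ih =>
    simp only [applyB, okB] at ih ⊢
    simp only [List.map_cons]
    rw [dfsStep_cons, dfsStep_cons, dfsStep_cons]
    simp only [List.zip_cons_cons, List.all_cons]
    rw [Bool.eq_iff_iff] at ih ⊢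
    simp only [Bool.and_eq_true, decide_eq_true_eq] at ih ⊢
    simp only [List.cons.injEq]
    rw [ih]
    have hhead := rowEq (PySem.Int.toStr (PySem.List.pyGetD row 0 0)) d0 d1 d2
      (PySem.List.pyGetD row 1 0) (PySem.List.pyGetD row 2 0)
    rw [Bool.eq_iff_iff] at hhead
    simp only [decide_eq_true_eq] at hhead
    rw [hhead]
    norm_num

theorem solution_spec' (baseball : List (List Int)) (_hD : Dom_solution baseball)
    (_hP : Pre_solution baseball) : solution baseball = solution_alt baseball := by
  unfold solution solution_alt
  dsimp only
  rw [show List.replicate baseball.length ((0 : Int), (0 : Int))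
      = (baseball.map (fun row =>
          (buildPos (PySem.Int.toStr (PySem.List.pyGetD row 0 0)),
           PySem.List.pyGetD row 1 0, PySem.List.pyGetD row 2 0))).map (fun _ => ((0 : Int), (0 : Int)))
    from by rw [List.map_const', List.length_map]]
  rw [dfsB_spec _ 3 0 [] _ rfl, seqsB_eq_perms]
  calc ((PySem.List.permutations (PySem.List.pyRange 1 10 1) 3).map (fun t => t.map PySem.Int.toStr)).foldl
        (fun cnt x => if (baseball.map (fun row => PySem.Int.toStr (PySem.List.pyGetD row 0 0))).map
            (fun y => baseballFun x y) = baseball.map (fun row => [PySem.List.pyGetD row 1 0, PySem.List.pyGetD row 2 0])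
          then cnt + 1 else cnt) 0
      = ((PySem.List.permutations (PySem.List.pyRange 1 10 1) 3).map (fun t => t.map PySem.Int.toStr)).foldl
        (fun cnt x => if (decide ((baseball.map (fun row => PySem.Int.toStr (PySem.List.pyGetD row 0 0))).map
            (fun y => baseballFun x y) = baseball.map (fun row => [PySem.List.pyGetD row 1 0, PySem.List.pyGetD row 2 0]))) = true
          then cnt + 1 else cnt) 0 := by simp only [decide_eq_true_eq]
    _ = 0 + (((PySem.List.permutations (PySem.List.pyRange 1 10 1) 3).map (fun t => t.map PySem.Int.toStr)).countP
          (fun x => decide ((baseball.map (fun row => PySem.Int.toStr (PySem.List.pyGetD row 0 0))).map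
            (fun y => baseballFun x y) = baseball.map (fun row => [PySem.List.pyGetD row 1 0, PySem.List.pyGetD row 2 0]))) : Int) :=
        PySem.List.foldl_count_if _ _ 0
    _ = _ := by
        rw [zero_add]
        congr 1
        rw [← seqsB_eq_perms]
        apply List.countP_congr
        intro x hx
        have hlen := seqsB_len x hx
        match x, hlen with
        | [d0, d1, d2], _ =>
          rw [cand_eq]
          norm_num

-- ===== VERDICT (by name: the statement is the Claim_ definition above) =====
theorem solution_spec : Claim_equal_solution := by
  intro baseball hD hP
  exact solution_spec' baseball hD hP
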